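-- pv_equiv track=rewrite | github.com/mengyi-chen/HEA-simulation | sro.py | build_sro_element_pairs
-- ===== SOURCE A (Python) =====
-- from typing import List, Dict, Tuple
--
-- def build_sro_element_pairs(elements: List[str]) -> List[str]:
--     """Build list of element pairs for SRO calculation
--
--     Args:
--         elements: List of element symbols
--
--     Returns:
--         List of element pair strings (e.g., ['X-X', 'X-Ni', ...])
--     """
--     cations = [e for e in elements if e != 'X']
--
--     sro_pairs = []
--     sro_pairs.append('X-X')  # Vacancy clustering
--
--     for cation in cations:
--         sro_pairs.append(f'X-{cation}')
--
--     for i, elem_A in enumerate(cations):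
--         for j, elem_B in enumerate(cations):
--             if j >= i:
--                 sro_pairs.append(f"{elem_A}-{elem_B}")
--
--     return sro_pairs
-- ===== SOURCE B (Python) =====
-- def build_sro_element_pairs(elements):
--     """Build list of element pairs for SRO calculation (suffix-sweep form).
--
--     Treat 'X' as the first ordinary element and emit, for each suffix of the
--     full element list, the pairs of its head with every member of the suffix.
--     This unifies A's special-cased vacancy-pair append, X-cation loop and index-based
--     upper-triangular double loop into one traversal.
--     """
--     pairs = []
--     suffix = ['X'] + [e for e in elements if e != 'X']
--     while suffix:
--         a = suffix[0]
--         pairs += [f'{a}-{b}' for b in suffix]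
--         suffix = suffix[1:]
--     return pairs
-- ===== Notes on version B (the rewrite author's own statement) =====
-- stated objective: simpler
-- what changed: Replaces the special-cased vacancy-pair append, the vacancy-cation loop and the index-comparing (j >= i) double loop by a single sweep over the suffixes of the full element list (vacancy first), pairing each suffix head with every suffix member.
import Mathlib
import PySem

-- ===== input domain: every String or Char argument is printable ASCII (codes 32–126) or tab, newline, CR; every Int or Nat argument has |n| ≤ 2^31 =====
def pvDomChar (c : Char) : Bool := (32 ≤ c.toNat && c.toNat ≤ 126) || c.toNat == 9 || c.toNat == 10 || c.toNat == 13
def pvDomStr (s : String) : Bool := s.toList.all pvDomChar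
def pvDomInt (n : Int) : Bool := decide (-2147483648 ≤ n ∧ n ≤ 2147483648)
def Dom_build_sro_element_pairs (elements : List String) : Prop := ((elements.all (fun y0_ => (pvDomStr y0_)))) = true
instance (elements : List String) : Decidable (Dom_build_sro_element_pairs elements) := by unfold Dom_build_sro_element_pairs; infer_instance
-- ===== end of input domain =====

-- B replaces A's special-cased vacancy-pair append, X-cation loop and (j >= i) double loop by one
-- sweep over the suffixes of 'X' :: cations (simpler decomposition; same return value).

-- ===== PORT A =====
def build_sro_element_pairs (elements : List String) : List String :=
  let cations := elements.filter (fun e => e ≠ "X")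
  let sro_pairs : List String := []
  let sro_pairs := sro_pairs ++ ["X-X"]
  let sro_pairs := cations.foldl (fun acc cation => acc ++ ["X-" ++ cation]) sro_pairs
  let sro_pairs :=
    (PySem.List.enumerate cations 0).foldl (fun acc p =>
      (PySem.List.enumerate cations 0).foldl (fun acc2 q =>
        if q.1 ≥ p.1 then acc2 ++ [p.2 ++ "-" ++ q.2] else acc2) acc) sro_pairs
  sro_pairs

-- ===== PORT B =====
-- one sweep over the suffixes: head paired with every member of the suffix
def suffixPairs : List String → List String
  | [] => []
  | a :: rest => (a :: rest).map (fun b => a ++ "-" ++ b) ++ suffixPairs rest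

def build_sro_element_pairs_alt (elements : List String) : List String :=
  suffixPairs ("X" :: elements.filter (fun e => e ≠ "X"))

-- ===== PRECONDITION & SPEC =====
def Spec_build_sro_element_pairs (elements : List String) (out : List String) : Prop := out = build_sro_element_pairs_alt elements
instance (elements : List String) (out : List String) : Decidable (Spec_build_sro_element_pairs elements out) := by unfold Spec_build_sro_element_pairs; infer_instance

-- ===== CLAIM (what is proved, stated in full; the proofs are below) =====
def Claim_equal_build_sro_element_pairs : Prop := ∀ (elements : List String), Dom_build_sro_element_pairs elements → Spec_build_sro_element_pairs elements (build_sro_element_pairs elements)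

-- ===== LEMMAS AND PROOFS =====

-- A's X-cation loop appends one formatted string per cation: it is a map.
theorem foldl_append_map (l : List String) (acc : List String) :
    l.foldl (fun acc cation => acc ++ ["X-" ++ cation]) acc = acc ++ l.map (fun c => "X-" ++ c) := by
  induction l generalizing acc with
  | nil => simp
  | cons x xs ih => simp [List.foldl_cons, ih]

-- A's inner loop (guard j ≥ i over enumerate starting at s) appends the pairs of `a`
-- with the suffix of l that starts at index (i - s).
theorem inner_fold (a : String) (l : List String) :
    ∀ (s i : Int) (acc : List String),
      (PySem.List.enumerate l s).foldl (fun acc2 q => if q.1 ≥ i then acc2 ++ [a ++ "-" ++ q.2] else acc2) acc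
        = acc ++ (l.drop (i - s).toNat).map (fun b => a ++ "-" ++ b) := by
  induction l with
  | nil => intro s i acc; simp [PySem.List.enumerate]
  | cons x xs ih =>
    intro s i acc
    rw [PySem.List.enumerate_cons, List.foldl_cons]
    by_cases h : s ≥ i
    · have h0 : (i - s).toNat = 0 := by omega
      have h1 : (i - (s + 1)).toNat = 0 := by omega
      simp only [h]
      rw [ih (s + 1) i]
      simp [h0, h1]
    · have h0 : (i - s).toNat = (i - (s + 1)).toNat + 1 := by omega
      simp only [if_neg (by omega : ¬ (s : Int) ≥ i)]
      rw [ih (s + 1) i]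
      simp [h0]

-- A's outer loop over enumerate, with each row given by inner_fold, builds the suffix pairs.
theorem outer_fold (c : List String) :
    ∀ (t : List String) (s : Int) (acc : List String), 0 ≤ s → t = c.drop s.toNat →
      (PySem.List.enumerate t s).foldl (fun acc p =>
          (PySem.List.enumerate c 0).foldl (fun acc2 q =>
            if q.1 ≥ p.1 then acc2 ++ [p.2 ++ "-" ++ q.2] else acc2) acc) acc
        = acc ++ suffixPairs t := by
  intro t
  induction t with
  | nil => intro s acc _ _; simp [PySem.List.enumerate, suffixPairs]
  | cons x xs ih =>
    intro s acc hs ht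
    rw [PySem.List.enumerate_cons, List.foldl_cons]
    rw [inner_fold x c 0 s]
    have hdrop : c.drop (s - 0).toNat = x :: xs := by simpa using ht.symm
    have hxs : xs = c.drop (s + 1).toNat := by
      have : (s + 1).toNat = (s - 0).toNat + 1 := by omega
      rw [this, ← List.drop_drop, hdrop]; simp
    rw [ih (s + 1) _ (by omega) hxs, hdrop]
    simp [suffixPairs]

-- ===== VERDICT (by name: the statement is the Claim_ definition above) =====
theorem build_sro_element_pairs_spec : Claim_equal_build_sro_element_pairs := by
  intro elements _
  unfold Spec_build_sro_element_pairs build_sro_element_pairs build_sro_element_pairs_alt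
  dsimp only
  rw [foldl_append_map, outer_fold _ _ 0 _ (by omega) (by simp)]
  simp [suffixPairs]
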